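-- pv_equiv track=rewrite | github.com/Moser9815/homr-serverless | spatial_pitch_alignment.py | _group_by_beat
-- ===== SOURCE A (Python) =====
-- def _group_by_beat(notes):
--     """Group transformer notes by (measure, beat)."""
--     if not notes:
--         return []
--     groups = []
--     current = [notes[0]]
--     for n in notes[1:]:
--         if (n["measure"] == current[0]["measure"]
--                 and n["beat"] == current[0]["beat"]):
--             current.append(n)
--         else:
--             groups.append(current)
--             current = [n]
--     groups.append(current)
--     return groups
-- ===== SOURCE B (Python) =====
-- def _group_by_beat(notes):
--     """Group transformer notes by (measure, beat) via a cut-index table: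
--     one pass records the boundary positions, a second pass slices them out."""
--     if not notes:
--         return []
--     cuts = [0]
--     for i, (prev, cur) in enumerate(zip(notes, notes[1:]), 1):
--         if (cur["measure"], cur["beat"]) != (prev["measure"], prev["beat"]):
--             cuts.append(i)
--     cuts.append(len(notes))
--     return [notes[a:b] for a, b in zip(cuts, cuts[1:])]
-- ===== Notes on version B (the rewrite author's own statement) =====
-- stated objective: alternative
-- what changed: Replaces the single-pass current-group accumulator with a two-pass cut-table construction: one pass over adjacent pairs records boundary indices, a second pass slices the note list at adjacent cut points.
import Mathlib
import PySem

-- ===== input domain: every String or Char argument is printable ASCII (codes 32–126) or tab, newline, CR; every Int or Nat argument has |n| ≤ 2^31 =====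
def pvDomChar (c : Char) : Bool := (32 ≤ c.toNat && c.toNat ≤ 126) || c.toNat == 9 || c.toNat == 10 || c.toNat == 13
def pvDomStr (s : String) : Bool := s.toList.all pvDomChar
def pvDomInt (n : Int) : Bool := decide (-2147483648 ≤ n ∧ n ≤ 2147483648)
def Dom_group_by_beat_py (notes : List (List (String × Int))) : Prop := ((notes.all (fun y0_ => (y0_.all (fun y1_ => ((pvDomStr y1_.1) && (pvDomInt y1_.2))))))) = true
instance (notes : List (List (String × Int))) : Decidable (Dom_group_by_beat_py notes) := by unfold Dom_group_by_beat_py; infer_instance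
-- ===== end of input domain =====

-- B replaces A's running-group accumulator by a cut-index table (boundary pass, then a slicing pass); same cost, different decomposition.


-- ===== PORT A =====
-- one step of A's loop body (state = (groups, current)); comparisons are the dict lookups of the Python condition
def pvStepA (s : List (List (List (String × Int))) × List (List (String × Int)))
    (n : List (String × Int)) : List (List (List (String × Int))) × List (List (String × Int)) :=
  if (PySem.Dict.get? ⟨n⟩ "measure" == PySem.Dict.get? (⟨s.2.headI⟩ : PySem.Dict String Int) "measure")
      && (PySem.Dict.get? ⟨n⟩ "beat" == PySem.Dict.get? (⟨s.2.headI⟩ : PySem.Dict String Int) "beat")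
  then (s.1, s.2 ++ [n])
  else (s.1 ++ [s.2], [n])

def group_by_beat_py (notes : List (List (String × Int))) : List (List (List (String × Int))) :=
  match notes with
  | [] => []
  | h :: t =>
    let s := t.foldl pvStepA ([], [h])
    s.1 ++ [s.2]

-- ===== PORT B =====
-- the (measure, beat) tuple Source B compares
def pvKeyB (nt : List (String × Int)) : Option Int × Option Int :=
  (PySem.Dict.get? ⟨nt⟩ "measure", PySem.Dict.get? ⟨nt⟩ "beat")

-- one step of Source B's boundary pass: append the cut index when adjacent keys differ
def pvStepB (cuts : List Int) (ip : Int × (List (String × Int) × List (String × Int))) : List Int :=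
  if pvKeyB ip.2.2 != pvKeyB ip.2.1 then cuts ++ [ip.1] else cuts

def group_by_beat_py_alt (notes : List (List (String × Int))) : List (List (List (String × Int))) :=
  match notes with
  | [] => []
  | _ :: _ =>
    let cuts := (PySem.List.enumerate (notes.zip (PySem.List.slice notes (some 1) none)) 1).foldl pvStepB [(0 : Int)]
    let cuts2 := cuts ++ [(notes.length : Int)]
    (cuts2.zip cuts2.tail).map (fun ab => PySem.List.slice notes (some ab.1) (some ab.2))

-- ===== PRECONDITION & SPEC =====
-- Pre_ excludes multi-element inputs with a note missing a "measure" or "beat" key: there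
-- Python A raises KeyError, except in the short-circuit corner (only "beat" missing while
-- measures always differ), where A still returns but B raises KeyError (see claim.json cites).
-- Lists of length <= 1 perform no lookup at all, so they stay inside Pre_.
def Pre_group_by_beat_py (notes : List (List (String × Int))) : Prop :=
  notes.length ≤ 1 ∨ ∀ nt ∈ notes, (PySem.Dict.get? (⟨nt⟩ : PySem.Dict String Int) "measure").isSome
    ∧ (PySem.Dict.get? (⟨nt⟩ : PySem.Dict String Int) "beat").isSome
instance (notes : List (List (String × Int))) : Decidable (Pre_group_by_beat_py notes) := by
  unfold Pre_group_by_beat_py; infer_instance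

def pvWitness_group_by_beat_py : (List (List (String × Int))) :=
  [[("measure", 1), ("beat", 1)], [("measure", 1), ("beat", 2)], [("measure", 2), ("beat", 1)]]

def Spec_group_by_beat_py (notes : List (List (String × Int))) (out : List (List (List (String × Int)))) : Prop := out = group_by_beat_py_alt notes
instance (notes : List (List (String × Int))) (out : List (List (List (String × Int)))) : Decidable (Spec_group_by_beat_py notes out) := by unfold Spec_group_by_beat_py; infer_instance

-- ===== CLAIM (what is proved, stated in full; the proofs are below) =====
def Claim_equal_group_by_beat_py : Prop := ∀ (notes : List (List (String × Int))), Dom_group_by_beat_py notes → Pre_group_by_beat_py notes → Spec_group_by_beat_py notes (group_by_beat_py notes)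

-- ===== LEMMAS AND PROOFS =====

-- A's loop condition is equality of the key tuples
theorem pvStepA_eq (s : List (List (List (String × Int))) × List (List (String × Int)))
    (n : List (String × Int)) :
    pvStepA s n = if pvKeyB n = pvKeyB s.2.headI then (s.1, s.2 ++ [n]) else (s.1 ++ [s.2], [n]) := by
  unfold pvStepA pvKeyB
  by_cases h1 : PySem.Dict.get? (⟨n⟩ : PySem.Dict String Int) "measure"
      = PySem.Dict.get? (⟨s.2.headI⟩ : PySem.Dict String Int) "measure" <;>
    by_cases h2 : PySem.Dict.get? (⟨n⟩ : PySem.Dict String Int) "beat"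
      = PySem.Dict.get? (⟨s.2.headI⟩ : PySem.Dict String Int) "beat" <;>
    simp [h1, h2, Prod.ext_iff]

-- the groups accumulator only grows on the right
theorem pvFoldA_acc (t : List (List (String × Int)))
    (gs : List (List (List (String × Int)))) (cur : List (List (String × Int))) :
    t.foldl pvStepA (gs, cur) =
      (gs ++ (t.foldl pvStepA ([], cur)).1, (t.foldl pvStepA ([], cur)).2) := by
  induction t generalizing gs cur with
  | nil => simp
  | cons x t ih =>
    simp only [List.foldl_cons, pvStepA_eq, List.nil_append]
    by_cases h : pvKeyB x = pvKeyB cur.headI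
    · simp only [if_pos h]
      exact ih gs (cur ++ [x])
    · simp only [if_neg h]
      rw [ih (gs ++ [cur]) [x], ih [cur] [x]]
      simp
-- a run of matching notes is absorbed into the current group
theorem pvFoldA_run (t1 : List (List (String × Int)))
    (gs : List (List (List (String × Int)))) (cur : List (List (String × Int)))
    (hcur : cur ≠ []) (hall : ∀ y ∈ t1, pvKeyB y = pvKeyB cur.headI) :
    t1.foldl pvStepA (gs, cur) = (gs, cur ++ t1) := by
  induction t1 generalizing cur with
  | nil => simp
  | cons y t1 ih =>
    simp only [List.foldl_cons, pvStepA_eq]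
    rw [if_pos (hall y (by simp))]
    have hne : cur ++ [y] ≠ [] := by simp
    have hh : (cur ++ [y]).headI = cur.headI := by
      cases cur with
      | nil => exact absurd rfl hcur
      | cons a c => simp
    rw [ih (cur ++ [y]) hne (by intro z hz; rw [hh]; exact hall z (by simp [hz]))]
    simp

-- the first element dropWhile keeps fails the predicate
theorem pvDropWhile_cons_not {a : Type} (p : a -> Bool) (l : List a) (x : a) (xs : List a)
    (h : l.dropWhile p = x :: xs) : p x = false := by
  induction l with
  | nil => simp at h
  | cons c l ih =>
    rw [List.dropWhile_cons] at h
    by_cases hp : p c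
    · exact ih (by simpa [hp] using h)
    · rw [if_neg (by simpa using hp)] at h
      injection h with h1 h2
      rw [← h1]
      simpa using hp

-- A emits the leading run as one group and restarts on the rest
theorem pvA_run (h : List (String × Int)) (t : List (List (String × Int))) :
    group_by_beat_py (h :: t) =
      (h :: t.takeWhile (fun x => pvKeyB x == pvKeyB h)) ::
        group_by_beat_py (t.dropWhile (fun x => pvKeyB x == pvKeyB h)) := by
  have hsplit := List.takeWhile_append_dropWhile (p := fun x => pvKeyB x == pvKeyB h) (l := t)
  have hall : ∀ y ∈ t.takeWhile (fun x => pvKeyB x == pvKeyB h), pvKeyB y = pvKeyB h := by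
    intro y hy
    simpa using List.mem_takeWhile_imp hy
  cases hdrop : t.dropWhile (fun x => pvKeyB x == pvKeyB h) with
  | nil =>
    have hpall : ∀ y ∈ t, (fun x => pvKeyB x == pvKeyB h) y = true :=
      List.dropWhile_eq_nil_iff.mp hdrop
    have ht : t.takeWhile (fun x => pvKeyB x == pvKeyB h) = t :=
      List.takeWhile_eq_self_iff.mpr hpall
    have hallt : ∀ y ∈ t, pvKeyB y = pvKeyB h := by
      intro y hy; simpa using hpall y hy
    show (t.foldl pvStepA ([], [h])).1 ++ [(t.foldl pvStepA ([], [h])).2] = _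
    rw [pvFoldA_run t [] [h] (by simp) (by intro y hy; simpa using hallt y hy)]
    simp [group_by_beat_py, ht]
  | cons x t2 =>
    have hx : ¬ (pvKeyB x = pvKeyB h) := by
      have := pvDropWhile_cons_not (fun x => pvKeyB x == pvKeyB h) t x t2 hdrop
      simpa using this
    have ht : t = t.takeWhile (fun x => pvKeyB x == pvKeyB h) ++ x :: t2 := by
      conv_lhs => rw [← hsplit, hdrop]
    show (t.foldl pvStepA ([], [h])).1 ++ [(t.foldl pvStepA ([], [h])).2] = _
    rw [show t.foldl pvStepA ([], [h])
        = (t.takeWhile (fun x => pvKeyB x == pvKeyB h) ++ x :: t2).foldl pvStepA ([], [h]) by rw [← ht]]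
    rw [List.foldl_append]
    rw [pvFoldA_run _ _ [h] (by simp) (by intro y hy; simpa using hall y hy)]
    simp only [List.foldl_cons, pvStepA_eq]
    have hhI : (([h] : List (List (String × Int))) ++ t.takeWhile (fun x => pvKeyB x == pvKeyB h)).headI = h := by simp
    rw [hhI, if_neg hx]
    rw [pvFoldA_acc t2 _ [x]]
    simp [group_by_beat_py]

-- Source B's boundary pass, computed recursively: pvBnds prev i l = the list of cut indices
def pvBnds (prev : List (String × Int)) (i : Int) : List (List (String × Int)) → List Int
  | [] => []
  | x :: xs => if pvKeyB x != pvKeyB prev then i :: pvBnds x (i + 1) xs else pvBnds x (i + 1) xs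

theorem pvFoldB_eq (l : List (List (String × Int))) (prev : List (String × Int))
    (i : Int) (cuts : List Int) :
    (PySem.List.enumerate ((prev :: l).zip l) i).foldl pvStepB cuts = cuts ++ pvBnds prev i l := by
  induction l generalizing prev i cuts with
  | nil => simp [PySem.List.enumerate_nil, pvBnds]
  | cons x xs ih =>
    simp only [List.zip_cons_cons, PySem.List.enumerate_cons, List.foldl_cons, pvBnds, pvStepB]
    by_cases h : pvKeyB x != pvKeyB prev
    · simp only [if_pos h]
      rw [ih x (i + 1) (cuts ++ [i])]
      simp
    · simp only [if_neg h]
      exact ih x (i + 1) cuts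

theorem pvBnds_all (l : List (List (String × Int))) (prev : List (String × Int)) (i : Int)
    (k : Option Int × Option Int) (hprev : pvKeyB prev = k) (hall : ∀ y ∈ l, pvKeyB y = k) :
    pvBnds prev i l = [] := by
  induction l generalizing prev i with
  | nil => rfl
  | cons x xs ih =>
    have hx : pvKeyB x = k := hall x (by simp)
    simp only [pvBnds, hx, hprev, bne_self_eq_false]
    simp only [Bool.false_eq_true, if_false]
    exact ih x (i + 1) hx (by intro y hy; exact hall y (by simp [hy]))

theorem pvBnds_shift (l : List (List (String × Int))) (prev : List (String × Int)) (i r : Int) :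
    pvBnds prev (i + r) l = (pvBnds prev i l).map (· + r) := by
  induction l generalizing prev i with
  | nil => rfl
  | cons x xs ih =>
    simp only [pvBnds]
    by_cases h : pvKeyB x != pvKeyB prev
    · simp only [if_pos h, List.map_cons]
      rw [show i + r + 1 = (i + 1) + r by ring, ih x (i + 1)]
    · simp only [if_neg h]
      rw [show i + r + 1 = (i + 1) + r by ring, ih x (i + 1)]

theorem pvBnds_split (h x : List (String × Int)) (t1 t2 : List (List (String × Int)))
    (hall : ∀ y ∈ t1, pvKeyB y = pvKeyB h) (hx : pvKeyB x ≠ pvKeyB h) (i : Int) :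
    pvBnds h i (t1 ++ x :: t2) = (i + t1.length) :: pvBnds x (i + t1.length + 1) t2 := by
  induction t1 generalizing h i with
  | nil =>
    simp only [List.nil_append, pvBnds, List.length_nil]
    rw [if_pos (by simpa using hx)]
    simp
  | cons y t1 ih =>
    have hy : pvKeyB y = pvKeyB h := hall y (by simp)
    simp only [List.cons_append, pvBnds, hy, bne_self_eq_false]
    simp only [Bool.false_eq_true, if_false]
    rw [ih y (by intro z hz; rw [hall z (by simp [hz])]; exact hy.symm)
      (by rw [hy]; exact hx) (i + 1)]
    simp only [List.length_cons]
    push_cast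
    congr 1
    · ring
    · congr 1
      ring

-- every recorded cut index is at least the starting index
theorem pvBnds_ge (l : List (List (String × Int))) (prev : List (String × Int)) (i : Int) :
    ∀ e ∈ pvBnds prev i l, i ≤ e := by
  induction l generalizing prev i with
  | nil => simp [pvBnds]
  | cons x xs ih =>
    intro e he
    simp only [pvBnds] at he
    by_cases h : pvKeyB x != pvKeyB prev
    · rw [if_pos h] at he
      rcases List.mem_cons.mp he with rfl | he'
      · omega
      · have := ih x (i + 1) e he'; omega
    · rw [if_neg h] at he
      have := ih x (i + 1) e he; omega

-- adjacent pairs of a mapped list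
theorem pvPairs_map (c : List Int) (f : Int → Int) :
    ((c.map f).zip (c.map f).tail) = (c.zip c.tail).map (fun ab => (f ab.1, f ab.2)) := by
  induction c with
  | nil => rfl
  | cons a c ih =>
    cases c with
    | nil => rfl
    | cons b c =>
      simp only [List.map_cons, List.tail_cons, List.zip_cons_cons] at *
      rw [ih]

-- slicing a shifted window of u ++ v is slicing v
theorem pvSlice_shift (u v : List (List (String × Int))) (a b : Int) (ha : 0 ≤ a) (hb : 0 ≤ b) :
    PySem.List.slice (u ++ v) (some ((u.length : Int) + a)) (some ((u.length : Int) + b)) =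
      PySem.List.slice v (some a) (some b) := by
  rw [PySem.List.slice_toNat _ (by omega) (by omega), PySem.List.slice_toNat _ ha hb,
    List.drop_append, List.drop_of_length_le (by omega), List.nil_append]
  congr 1
  · omega
  · congr 1
    omega

-- B's result for a nonempty input, in terms of pvBnds
theorem pvB_cuts (h : List (String × Int)) (t : List (List (String × Int))) :
    group_by_beat_py_alt (h :: t) =
      (((0 :: pvBnds h 1 t ++ [((h :: t).length : Int)]).zip
        (0 :: pvBnds h 1 t ++ [((h :: t).length : Int)]).tail).map
        (fun ab => PySem.List.slice (h :: t) (some ab.1) (some ab.2))) := by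
  show (let cuts := (PySem.List.enumerate ((h :: t).zip (PySem.List.slice (h :: t) (some 1) none)) 1).foldl pvStepB [(0 : Int)]
        let cuts2 := cuts ++ [((h :: t).length : Int)]
        (cuts2.zip cuts2.tail).map (fun ab => PySem.List.slice (h :: t) (some ab.1) (some ab.2))) = _
  rw [PySem.List.slice_from_one]
  simp only [List.tail_cons]
  rw [pvFoldB_eq t h 1 [0]]
  rfl

-- B emits the leading run as one slice and restarts on the rest
theorem pvB_run (h : List (String × Int)) (t : List (List (String × Int))) :
    group_by_beat_py_alt (h :: t) =
      (h :: t.takeWhile (fun x => pvKeyB x == pvKeyB h)) ::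
        group_by_beat_py_alt (t.dropWhile (fun x => pvKeyB x == pvKeyB h)) := by
  have hsplit := List.takeWhile_append_dropWhile (p := fun x => pvKeyB x == pvKeyB h) (l := t)
  have hall : ∀ y ∈ t.takeWhile (fun x => pvKeyB x == pvKeyB h), pvKeyB y = pvKeyB h := by
    intro y hy; simpa using List.mem_takeWhile_imp hy
  rw [pvB_cuts]
  cases hdrop : t.dropWhile (fun x => pvKeyB x == pvKeyB h) with
  | nil =>
    have hpall : ∀ y ∈ t, (fun x => pvKeyB x == pvKeyB h) y = true :=
      List.dropWhile_eq_nil_iff.mp hdrop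
    have ht : t.takeWhile (fun x => pvKeyB x == pvKeyB h) = t :=
      List.takeWhile_eq_self_iff.mpr hpall
    have hallt : ∀ y ∈ t, pvKeyB y = pvKeyB h := by
      intro y hy; simpa using hpall y hy
    rw [pvBnds_all t h 1 (pvKeyB h) rfl hallt]
    simp only [List.singleton_append, List.zip_cons_cons, List.tail_cons,
      List.zip_nil_right, List.map_cons, List.map_nil, ht]
    rw [PySem.List.slice_toNat _ (by omega) (by omega)]
    simp [group_by_beat_py_alt]
  | cons x t2 =>
    have hx : ¬ (pvKeyB x = pvKeyB h) := by
      have := pvDropWhile_cons_not (fun x => pvKeyB x == pvKeyB h) t x t2 hdrop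
      simpa using this
    set t1 := t.takeWhile (fun x => pvKeyB x == pvKeyB h) with ht1
    have ht : t = t1 ++ x :: t2 := by conv_lhs => rw [← hsplit, hdrop]
    set r : Int := (t1.length : Int) + 1 with hr
    have hbnds : pvBnds h 1 t = r :: (pvBnds x 1 t2).map (· + r) := by
      rw [show pvBnds h 1 t = pvBnds h 1 (t1 ++ x :: t2) by rw [← ht],
        pvBnds_split h x t1 t2 hall hx 1]
      congr 1
      · omega
      · rw [show (1 : Int) + t1.length + 1 = 1 + r by omega, pvBnds_shift]
    have hlen : ((h :: t).length : Int) = r + ((x :: t2).length : Int) := by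
      rw [ht]; simp; ring
    rw [hbnds, hlen]
    simp only [List.cons_append, List.zip_cons_cons, List.tail_cons, List.map_cons]
    congr 1
    · -- first slice is the leading run
      rw [PySem.List.slice_toNat _ (by omega) (by omega),
          show r.toNat - (0 : Int).toNat = t1.length + 1 by omega,
          show ((0 : Int)).toNat = 0 from rfl,
          show (h :: t) = (h :: t1) ++ x :: t2 by simp [ht],
          List.drop_zero, List.take_append_of_le_length (by simp)]
      simp
    · -- remaining slices are B on the rest
      have e1 : (0 : Int) + r = r := by ring
      have e2 : ((x :: t2).length : Int) + r = r + ((x :: t2).length : Int) := by ring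
      have hmapC : ((0 :: pvBnds x 1 t2 ++ [((x :: t2).length : Int)]).map (· + r))
          = r :: ((pvBnds x 1 t2).map (· + r) ++ [r + ((x :: t2).length : Int)]) := by
        simp only [List.map_cons, List.map_append, List.map_nil, List.cons_append, e1, e2]
      have htail := congrArg List.tail hmapC
      simp only [List.tail_cons] at htail
      rw [← hmapC, ← htail, pvPairs_map, List.map_map, pvB_cuts x t2]
      apply List.map_congr_left
      intro ab hab
      have hm1 : ab.1 ∈ (0 :: pvBnds x 1 t2 ++ [((x :: t2).length : Int)]) :=
        (List.of_mem_zip hab).1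
      have hm2 : ab.2 ∈ (0 :: pvBnds x 1 t2 ++ [((x :: t2).length : Int)]) :=
        List.mem_of_mem_tail (List.of_mem_zip hab).2
      have hnn : ∀ e ∈ (0 :: pvBnds x 1 t2 ++ [((x :: t2).length : Int)]), 0 ≤ e := by
        intro e he
        rcases List.mem_cons.mp he with rfl | he'
        · omega
        rcases List.mem_append.mp he' with h1 | h1
        · have := pvBnds_ge t2 x 1 e h1; omega
        · simp at h1; omega
      have h1 := hnn ab.1 hm1
      have h2 := hnn ab.2 hm2
      simp only [Function.comp]
      rw [show (h :: t) = (h :: t1) ++ (x :: t2) by simp [ht]]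
      rw [show ab.1 + r = (((h :: t1).length : Int)) + ab.1 by simp; omega,
          show ab.2 + r = (((h :: t1).length : Int)) + ab.2 by simp; omega]
      exact pvSlice_shift (h :: t1) (x :: t2) ab.1 ab.2 h1 h2

-- main equivalence by strong induction on length
theorem pvMain (notes : List (List (String × Int))) :
    group_by_beat_py notes = group_by_beat_py_alt notes := by
  induction hn : notes.length using Nat.strong_induction_on generalizing notes with
  | _ n ih =>
    cases notes with
    | nil => rfl
    | cons h t =>
      rw [pvA_run, pvB_run]
      congr 1
      apply ih ((t.dropWhile (fun x => pvKeyB x == pvKeyB h)).length) _ _ rfl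
      have := List.length_dropWhile_le (fun x => pvKeyB x == pvKeyB h) t
      simp only [← hn, List.length_cons]
      omega

-- ===== VERDICT (by name: the statement is the Claim_ definition above) =====
theorem group_by_beat_py_spec : Claim_equal_group_by_beat_py := by
  intro notes _ _
  unfold Spec_group_by_beat_py
  exact pvMain notes
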